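-- pv_equiv track=rewrite | github.com/ncoombes/OHIO-PA-to-flat-file | OHIOPAtoflat.py | H_record_span_to_I_thru_R_spans
-- ===== SOURCE A (Python) =====
-- def H_record_span_to_I_thru_R_spans(list_of_records,H_span):
--     spans=[]
--     start_index=0
--     end_index=0
--     started=False
--     for i in range(H_span[0],H_span[1]+1):
--         if started==False:
--             if list_of_records[i][0]=="I":
--                 start_index=i
--                 started=True
--
--             if list_of_records[i][0]=="D" and list_of_records[i-1][0]!="I":
--                 start_index=i
--                 started=True
--
--         elif started==True:
--             if list_of_records[i+1][0]=="I" or list_of_records[i+1][0]=="D" or i==(H_span[1]):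
--                 end_index=i
--                 spans.append([start_index,end_index])
--                 started=False
--     return(spans)
-- ===== SOURCE B (Python) =====
-- def H_record_span_to_I_thru_R_spans(list_of_records, H_span):
--     lo, hi = H_span[0], H_span[1]
--
--     def is_start(i):
--         first = list_of_records[i][0]
--         return first == "I" or (first == "D" and list_of_records[i - 1][0] != "I")
--
--     def find_close(j):
--         # smallest j in the remaining range whose successor record is an I/D
--         # record, or the range end hi itself
--         while j <= hi:
--             if list_of_records[j + 1][0] in ("I", "D") or j == hi:
--                 return j
--             j += 1
--         return None
--
--     spans = []
--     i = lo
--     while i <= hi: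
--         if is_start(i):
--             end = find_close(i + 1)
--             if end is None:  # a span opened at the very last index never closes
--                 break
--             spans.append([i, end])
--             i = end + 1
--         else:
--             i += 1
--     return spans
-- ===== Notes on version B (the rewrite author's own statement) =====
-- stated objective: alternative
-- what changed: A's single flag-driven loop over the whole range (state machine with started/start_index) is replaced by a two-level jump scan: an outer loop looks for a span start with an is_start predicate, a find_close helper then searches for the closing index, and the outer scan resumes after the closed span, so no flag state is maintained.
-- outside the precondition, e.g. on H_record_span_to_I_thru_R_spans([['I'], ['I'], ['D'], ['X']], [0, 3]): A returns [[0, 1]], B returns [[0, 1]]; on H_record_span_to_I_thru_R_spans([['I'], [], ['I'], ['X']], [0, 2]): A returns [[0, 1]], B returns [[0, 1]]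
import Mathlib
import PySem

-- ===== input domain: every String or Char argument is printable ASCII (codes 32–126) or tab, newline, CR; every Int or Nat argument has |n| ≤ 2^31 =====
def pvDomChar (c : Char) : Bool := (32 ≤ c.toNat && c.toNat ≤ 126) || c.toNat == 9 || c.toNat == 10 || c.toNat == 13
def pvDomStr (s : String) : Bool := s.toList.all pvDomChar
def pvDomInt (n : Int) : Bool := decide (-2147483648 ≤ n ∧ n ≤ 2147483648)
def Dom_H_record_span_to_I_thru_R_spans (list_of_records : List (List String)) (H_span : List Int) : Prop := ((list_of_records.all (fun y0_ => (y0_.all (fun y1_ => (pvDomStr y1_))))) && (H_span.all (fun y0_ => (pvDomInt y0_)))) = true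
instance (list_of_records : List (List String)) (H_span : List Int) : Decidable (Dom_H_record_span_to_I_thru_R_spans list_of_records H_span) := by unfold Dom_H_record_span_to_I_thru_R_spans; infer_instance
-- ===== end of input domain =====

-- B replaces A's flag-driven state machine by a two-level jump scan (start search + close search helpers); same cost, different decomposition.

-- ===== PORT A =====
-- list_of_records[i][0], defaulting to "" where Python would raise (Pre_ excludes those inputs); shared by both ports
def pvField (rec : List (List String)) (i : Int) : String :=
  (PySem.List.pyGet? ((PySem.List.pyGet? rec i).getD []) 0).getD ""

-- the body of A's for-loop, acting on the state (spans, start_index, end_index, started)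
def pvAStep (rec : List (List String)) (hi : Int) (st : List (List Int) × Int × Int × Bool) (i : Int) :
    List (List Int) × Int × Int × Bool :=
  match st with
  | (spans, start_index, end_index, started) =>
    if started = false then
      if pvField rec i = "I" then (spans, i, end_index, true)
      else if pvField rec i = "D" ∧ pvField rec (i - 1) ≠ "I" then (spans, i, end_index, true)
      else (spans, start_index, end_index, started)
    else
      if pvField rec (i + 1) = "I" ∨ pvField rec (i + 1) = "D" ∨ i = hi then
        (spans ++ [[start_index, i]], start_index, i, false)
      else (spans, start_index, end_index, started)

def H_record_span_to_I_thru_R_spans (list_of_records : List (List String)) (H_span : List Int) : List (List Int) :=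
  let lo := (PySem.List.pyGet? H_span 0).getD 0
  let hi := (PySem.List.pyGet? H_span 1).getD 0
  ((PySem.List.pyRange lo (hi + 1) 1).foldl (pvAStep list_of_records hi) ([], 0, 0, false)).1

-- ===== PORT B =====
def pvIsStart (rec : List (List String)) (i : Int) : Bool :=
  pvField rec i == "I" || (pvField rec i == "D" && !(pvField rec (i - 1) == "I"))

-- B's find_close: while j <= hi …; fuel = number of remaining indices j..hi, so fuel 0 ⟺ j > hi ⟺ Python returns None
def pvFindClose (rec : List (List String)) (hi : Int) (j : Int) (fuel : Nat) : Option Int :=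
  match fuel with
  | 0 => none
  | f + 1 =>
    if pvField rec (j + 1) == "I" || pvField rec (j + 1) == "D" || j == hi then some j
    else pvFindClose rec hi (j + 1) f

-- B's outer while loop; fuel = number of remaining indices i..hi
def pvScan (rec : List (List String)) (hi : Int) (i : Int) (fuel : Nat) : List (List Int) :=
  match fuel with
  | 0 => []
  | f + 1 =>
    if pvIsStart rec i then
      match pvFindClose rec hi (i + 1) (hi - i).toNat with
      | none => []                                  -- span opened at the last index: stop without it
      | some e => [i, e] :: pvScan rec hi (e + 1) f
    else pvScan rec hi (i + 1) f

def H_record_span_to_I_thru_R_spans_alt (list_of_records : List (List String)) (H_span : List Int) : List (List Int) :=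
  let lo := (PySem.List.pyGet? H_span 0).getD 0
  let hi := (PySem.List.pyGet? H_span 1).getD 0
  pvScan list_of_records hi lo (hi + 1 - lo).toNat

-- ===== PRECONDITION & SPEC =====
-- record i exists (Python index semantics, negative = from the end) and is a non-empty list
def pvRecOK (rec : List (List String)) (i : Int) : Bool :=
  match PySem.List.pyGet? rec i with
  | some r => !r.isEmpty
  | none => false

-- Pre_ excludes every input on which Python A raises (H_span shorter than 2, an index of the H-range
-- outside list_of_records, an empty record where a first field is read, a missing record hi+1 behind a
-- span that reaches hi).  The last two conjuncts are slightly conservative: they demand record hi+1 and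
-- non-emptiness of every record of the range even on some inputs where A happens never to read them and
-- returns (see claim.json cites); both programs agree there anyway.
def Pre_H_record_span_to_I_thru_R_spans (list_of_records : List (List String)) (H_span : List Int) : Prop :=
  2 ≤ H_span.length ∧
  (let lo := (PySem.List.pyGet? H_span 0).getD 0
   let hi := (PySem.List.pyGet? H_span 1).getD 0
   (lo ≤ hi →
     ((-(list_of_records.length : Int) ≤ lo ∧ hi < (list_of_records.length : Int)) ∧
      (∀ i ∈ PySem.List.pyRange lo (hi + 1) 1, pvRecOK list_of_records i = true) ∧
      (pvField list_of_records lo = "D" → pvRecOK list_of_records (lo - 1) = true) ∧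
      ((∃ i ∈ PySem.List.pyRange lo (hi + 1) 1, pvIsStart list_of_records i = true ∧ i < hi) →
         pvRecOK list_of_records (hi + 1) = true))))
instance (list_of_records : List (List String)) (H_span : List Int) : Decidable (Pre_H_record_span_to_I_thru_R_spans list_of_records H_span) := by unfold Pre_H_record_span_to_I_thru_R_spans; infer_instance

def pvWitness_H_record_span_to_I_thru_R_spans : List (List String) × List Int :=
  ([["I"], ["X"], ["X"], ["Z"]], [0, 2])

def Spec_H_record_span_to_I_thru_R_spans (list_of_records : List (List String)) (H_span : List Int) (out : List (List Int)) : Prop := out = H_record_span_to_I_thru_R_spans_alt list_of_records H_span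
instance (list_of_records : List (List String)) (H_span : List Int) (out : List (List Int)) : Decidable (Spec_H_record_span_to_I_thru_R_spans list_of_records H_span out) := by unfold Spec_H_record_span_to_I_thru_R_spans; infer_instance

-- ===== CLAIM (what is proved, stated in full; the proofs are below) =====
def Claim_equal_H_record_span_to_I_thru_R_spans : Prop := ∀ (list_of_records : List (List String)) (H_span : List Int), Dom_H_record_span_to_I_thru_R_spans list_of_records H_span → Pre_H_record_span_to_I_thru_R_spans list_of_records H_span → Spec_H_record_span_to_I_thru_R_spans list_of_records H_span (H_record_span_to_I_thru_R_spans list_of_records H_span)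

-- ===== LEMMAS AND PROOFS =====

lemma pvFindClose_bound (rec : List (List String)) (hi : Int) :
    ∀ (f : Nat) (j j' : Int), pvFindClose rec hi j f = some j' → j ≤ j' ∧ j' < j + f := by
  intro f
  induction f with
  | zero => intro j j' h; simp [pvFindClose] at h
  | succ f ih =>
    intro j j' h
    rw [pvFindClose] at h
    split at h
    · cases h; omega
    · have := ih (j + 1) j' h; omega

lemma pvScan_fuel (rec : List (List String)) (hi : Int) :
    ∀ (f : Nat) (i : Int), (hi + 1 - i).toNat ≤ f →
      pvScan rec hi i f = pvScan rec hi i (hi + 1 - i).toNat := by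
  intro f
  induction f using Nat.strong_induction_on with
  | _ f ih =>
    intro i hb
    match f, hb with
    | 0, hb =>
      have : (hi + 1 - i).toNat = 0 := by omega
      rw [this]
    | f + 1, hb =>
      by_cases hih : i ≤ hi
      · have hm : (hi + 1 - i).toNat = (hi - i).toNat + 1 := by omega
        rw [hm, pvScan, pvScan]
        by_cases hs : pvIsStart rec i
        · simp only [hs, if_true]
          cases hfc : pvFindClose rec hi (i + 1) (hi - i).toNat with
          | none => rfl
          | some e =>
            have hbnd := pvFindClose_bound rec hi _ _ _ hfc
            have h1 : pvScan rec hi (e + 1) f = pvScan rec hi (e + 1) (hi + 1 - (e + 1)).toNat :=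
              ih f (by omega) _ (by omega)
            have h2 : pvScan rec hi (e + 1) (hi - i).toNat = pvScan rec hi (e + 1) (hi + 1 - (e + 1)).toNat :=
              ih (hi - i).toNat (by omega) _ (by omega)
            simp [h1, h2]
        · simp [hs]
          have h1 : pvScan rec hi (i + 1) f = pvScan rec hi (i + 1) (hi + 1 - (i + 1)).toNat :=
            ih f (by omega) _ (by omega)
          have h2 : pvScan rec hi (i + 1) (hi - i).toNat = pvScan rec hi (i + 1) (hi + 1 - (i + 1)).toNat :=
            ih (hi - i).toNat (by omega) _ (by omega)
          simp [h1, h2]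
      · -- i > hi : every fuel yields []
        have hm : (hi + 1 - i).toNat = 0 := by omega
        rw [hm, pvScan, pvScan]
        by_cases hs : pvIsStart rec i
        · simp only [hs, if_true]
          have : (hi - i).toNat = 0 := by omega
          rw [this, pvFindClose]
        · simp [hs]
          have h1 : pvScan rec hi (i + 1) f = pvScan rec hi (i + 1) (hi + 1 - (i + 1)).toNat :=
            ih f (by omega) _ (by omega)
          have h2 : (hi + 1 - (i + 1)).toNat = 0 := by omega
          rw [h1, h2]
          simp [pvScan]

-- the heart of the equivalence: A's fold over the remaining range, in either flag state, equals B's scans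
lemma pvMain (rec : List (List String)) (hi : Int) :
    ∀ (n : Nat) (i : Int), (hi + 1 - i).toNat = n →
      (∀ (spans : List (List Int)) (s e : Int),
        ((PySem.List.pyRange i (hi + 1) 1).foldl (pvAStep rec hi) (spans, s, e, false)).1
          = spans ++ pvScan rec hi i n)
      ∧ (∀ (spans : List (List Int)) (s e : Int),
        ((PySem.List.pyRange i (hi + 1) 1).foldl (pvAStep rec hi) (spans, s, e, true)).1
          = match pvFindClose rec hi i n with
            | none => spans
            | some j => spans ++ [s, j] :: pvScan rec hi (j + 1) (hi - j).toNat) := by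
  intro n
  induction n with
  | zero =>
    intro i hn
    have hnil : PySem.List.pyRange i (hi + 1) 1 = [] := PySem.List.pyRange_one_eq_nil (by omega)
    rw [hnil]
    constructor
    · intro spans s e; simp [pvScan]
    · intro spans s e; simp [pvFindClose]
  | succ n ih =>
    intro i hn
    have hile : i ≤ hi := by omega
    have hcons : PySem.List.pyRange i (hi + 1) 1 = i :: PySem.List.pyRange (i + 1) (hi + 1) 1 :=
      PySem.List.pyRange_one_cons (by omega)
    have hn' : (hi + 1 - (i + 1)).toNat = n := by omega
    have ihn := ih (i + 1) hn'
    constructor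
    · intro spans s e
      rw [hcons, List.foldl_cons]
      by_cases h1 : pvField rec i = "I"
      · have hstep : pvAStep rec hi (spans, s, e, false) i = (spans, i, e, true) := by
          simp [pvAStep, h1]
        rw [hstep, ihn.2]
        rw [pvScan]
        have hstart : pvIsStart rec i = true := by simp [pvIsStart, h1]
        simp only [hstart, if_true]
        have hfuel : (hi - i).toNat = n := by omega
        rw [hfuel]
        cases hfc : pvFindClose rec hi (i + 1) n with
        | none => simp
        | some j =>
          have hbnd := pvFindClose_bound rec hi _ _ _ hfc
          have hfe : pvScan rec hi (j + 1) n = pvScan rec hi (j + 1) (hi + 1 - (j + 1)).toNat :=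
            pvScan_fuel rec hi n _ (by omega)
          simp [hfe]
      · by_cases h2 : pvField rec i = "D" ∧ pvField rec (i - 1) ≠ "I"
        · have hstep : pvAStep rec hi (spans, s, e, false) i = (spans, i, e, true) := by
            simp [pvAStep, h2]
          rw [hstep, ihn.2]
          rw [pvScan]
          have hstart : pvIsStart rec i = true := by
            simp [pvIsStart, h2.1]
            intro hcontra
            exact absurd hcontra h2.2
          simp only [hstart, if_true]
          have hfuel : (hi - i).toNat = n := by omega
          rw [hfuel]
          cases hfc : pvFindClose rec hi (i + 1) n with
          | none => simp
          | some j =>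
            have hbnd := pvFindClose_bound rec hi _ _ _ hfc
            have hfe : pvScan rec hi (j + 1) n = pvScan rec hi (j + 1) (hi + 1 - (j + 1)).toNat :=
              pvScan_fuel rec hi n _ (by omega)
            simp [hfe]
        · have hstep : pvAStep rec hi (spans, s, e, false) i = (spans, s, e, false) := by
            simp [pvAStep, h1]
            intro ha
            by_contra hb
            exact h2 ⟨ha, hb⟩
          rw [hstep, ihn.1]
          rw [pvScan]
          have hstart : pvIsStart rec i = false := by
            simp [pvIsStart, h1]
            intro ha
            by_contra hb
            exact h2 ⟨ha, hb⟩
          simp [hstart]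
    · intro spans s e
      rw [hcons, List.foldl_cons]
      have hfuel : (hi - i).toNat = n := by omega
      by_cases hc : pvField rec (i + 1) = "I" ∨ pvField rec (i + 1) = "D" ∨ i = hi
      · have hstep : pvAStep rec hi (spans, s, e, true) i = (spans ++ [[s, i]], s, i, false) := by
          simp [pvAStep, hc]
        rw [hstep, ihn.1]
        rw [pvFindClose]
        have hcb : (pvField rec (i + 1) == "I" || pvField rec (i + 1) == "D" || i == hi) = true := by
          simp only [Bool.or_eq_true, beq_iff_eq]
          tauto
        simp only [hcb, if_true]
        rw [hfuel]
        simp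
      · have hstep : pvAStep rec hi (spans, s, e, true) i = (spans, s, e, true) := by
          simp [pvAStep, hc]
        rw [hstep, ihn.2]
        rw [pvFindClose]
        have hcb : (pvField rec (i + 1) == "I" || pvField rec (i + 1) == "D" || i == hi) = false := by
          simp only [Bool.or_eq_false_iff, beq_eq_false_iff_ne, ne_eq]
          tauto
        simp only [hcb]
        rw [if_neg (by simp : ¬(false = true))]

-- ===== VERDICT (by name: the statement is the Claim_ definition above) =====
theorem H_record_span_to_I_thru_R_spans_spec : Claim_equal_H_record_span_to_I_thru_R_spans := by
  intro rec hs _hd _hp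
  unfold Spec_H_record_span_to_I_thru_R_spans
  unfold H_record_span_to_I_thru_R_spans H_record_span_to_I_thru_R_spans_alt
  simp only []
  rw [(pvMain rec ((PySem.List.pyGet? hs 1).getD 0)
        ((((PySem.List.pyGet? hs 1).getD 0) + 1 - ((PySem.List.pyGet? hs 0).getD 0)).toNat)
        ((PySem.List.pyGet? hs 0).getD 0) rfl).1 [] 0 0]
  simp
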